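-- pv_equiv track=rewrite | github.com/goldmann/docker-squash | docker_scripts/squash.py | _layers_to_squash
-- ===== SOURCE A (Python) =====
-- def _layers_to_squash(layers, from_layer):
--     """ Prepares a list of layer IDs that should be squashed """
--     to_squash = []
--     to_leave = []
--     should_squash = True
--
--     for l in reversed(layers):
--         if l == from_layer:
--             should_squash = False
--
--         if should_squash:
--             to_squash.append(l)
--         else:
--             to_leave.append(l)
--
--     to_squash.reverse()
--     to_leave.reverse()
--
--     return to_squash, to_leave
-- ===== SOURCE B (Python) =====
-- def _layers_to_squash(layers, from_layer):
--     """ Prepares a list of layer IDs that should be squashed """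
--     if from_layer in layers:
--         idx = len(layers) - 1 - layers[::-1].index(from_layer)
--         return list(layers[idx + 1:]), list(layers[:idx + 1])
--     return list(layers), []
-- ===== Notes on version B (the rewrite author's own statement) =====
-- stated objective: simpler
-- what changed: Replaces the reversed-iteration with a boolean flag and two reversed accumulators by computing the last index of from_layer once and slicing the list there.
import Mathlib
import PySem

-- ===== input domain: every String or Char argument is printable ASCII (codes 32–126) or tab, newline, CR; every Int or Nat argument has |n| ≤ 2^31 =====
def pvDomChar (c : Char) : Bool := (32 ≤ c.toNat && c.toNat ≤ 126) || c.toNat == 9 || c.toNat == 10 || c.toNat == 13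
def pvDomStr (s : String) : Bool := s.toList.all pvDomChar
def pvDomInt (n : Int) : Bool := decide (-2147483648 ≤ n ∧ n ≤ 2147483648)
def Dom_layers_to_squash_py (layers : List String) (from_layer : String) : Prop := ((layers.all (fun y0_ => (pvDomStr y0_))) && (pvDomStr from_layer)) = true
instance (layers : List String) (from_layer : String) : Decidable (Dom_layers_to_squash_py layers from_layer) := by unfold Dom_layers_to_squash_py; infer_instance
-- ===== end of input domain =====

-- B replaces A's reversed iteration with a should_squash flag and two reversed accumulators
-- by locating the last occurrence of from_layer once and slicing the list there (simpler).

-- ===== PORT A =====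
-- literal port of A's loop body: flip the flag on a match, then append to one of the two lists
def stepA (fl : String) (st : List String × List String × Bool) (l : String) :
    List String × List String × Bool :=
  let should : Bool := if l == fl then false else st.2.2
  if should then (st.1 ++ [l], st.2.1, should) else (st.1, st.2.1 ++ [l], should)

-- port of A: iterate over reversed(layers) accumulating (to_squash, to_leave, should_squash),
-- then reverse both result lists.
def layers_to_squash_py (layers : List String) (from_layer : String) : List String × List String :=
  let st := layers.reverse.foldl (stepA from_layer) ([], [], true)
  (st.1.reverse, st.2.1.reverse)

-- ===== PORT B =====
-- port of Source B: if from_layer in layers, idx = len-1 - layers[::-1].index(from_layer);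
-- return (layers[idx+1:], layers[:idx+1]); else (layers, []).
-- The 'none' branch is unreachable under the membership guard (Python .index would raise there).
def layers_to_squash_py_alt (layers : List String) (from_layer : String) : List String × List String :=
  if from_layer ∈ layers then
    match PySem.List.index? layers.reverse from_layer with
    | some i =>
      let idx : Nat := layers.length - 1 - i
      (PySem.List.slice layers (some ((idx + 1 : Nat) : Int)) none,
       PySem.List.slice layers none (some ((idx + 1 : Nat) : Int)))
    | none => (layers, [])
  else (layers, [])

-- ===== PRECONDITION & SPEC =====
def Spec_layers_to_squash_py (layers : List String) (from_layer : String) (out : List String × List String) : Prop := out = layers_to_squash_py_alt layers from_layer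
instance (layers : List String) (from_layer : String) (out : List String × List String) : Decidable (Spec_layers_to_squash_py layers from_layer out) := by unfold Spec_layers_to_squash_py; infer_instance

-- ===== CLAIM (what is proved, stated in full; the proofs are below) =====
def Claim_equal_layers_to_squash_py : Prop := ∀ (layers : List String) (from_layer : String), Dom_layers_to_squash_py layers from_layer → Spec_layers_to_squash_py layers from_layer (layers_to_squash_py layers from_layer)

-- ===== LEMMAS AND PROOFS =====

-- pure recursive description of A's loop over the (already reversed) list
def goA (fl : String) : List String → Bool → List String × List String × Bool
  | [], s => ([], [], s)
  | l :: t, s =>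
      let s' : Bool := if l == fl then false else s
      let r := goA fl t s'
      if s' then (l :: r.1, r.2.1, r.2.2) else (r.1, l :: r.2.1, r.2.2)

theorem stepA_match (fl l : String) (a b : List String) (s : Bool) (h : (l == fl) = true) :
    stepA fl (a, b, s) l = (a, b ++ [l], false) := by simp [stepA, h]

theorem stepA_true (fl l : String) (a b : List String) (h : (l == fl) = false) :
    stepA fl (a, b, true) l = (a ++ [l], b, true) := by simp [stepA, h]

theorem stepA_false (fl l : String) (a b : List String) (h : (l == fl) = false) :
    stepA fl (a, b, false) l = (a, b ++ [l], false) := by simp [stepA, h]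

theorem foldA_eq_goA (fl : String) (r : List String) (a b : List String) (s : Bool) :
    r.foldl (stepA fl) (a, b, s)
      = (a ++ (goA fl r s).1, b ++ (goA fl r s).2.1, (goA fl r s).2.2) := by
  induction r generalizing a b s with
  | nil => simp [goA]
  | cons l t ih =>
    rw [List.foldl_cons]
    by_cases h : (l == fl) = true
    · rw [stepA_match fl l a b s h, ih]
      simp [goA, h]
    · have hb : (l == fl) = false := by simpa using h
      cases s with
      | true =>
        rw [stepA_true fl l a b hb, ih]
        simp [goA, hb]
      | false =>
        rw [stepA_false fl l a b hb, ih]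
        simp [goA, hb]

theorem goA_false (fl : String) (r : List String) : goA fl r false = ([], r, false) := by
  induction r with
  | nil => rfl
  | cons l t ih => simp [goA, ih]

theorem goA_true (fl : String) (r : List String) :
    goA fl r true =
      match PySem.List.index? r fl with
      | some i => (r.take i, r.drop i, false)
      | none => (r, [], true) := by
  induction r with
  | nil => simp [goA, PySem.List.index?]
  | cons l t ih =>
    by_cases h : l = fl
    · subst h
      rw [PySem.List.index?_cons_self]
      simp [goA, goA_false]
    · have hne : (l == fl) = false := by simpa using h
      rw [PySem.List.index?_cons_of_ne t h]
      cases hidx : PySem.List.index? t fl with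
      | none =>
        rw [PySem.List.index?_eq_idxOf?] at hidx
        simp [goA, hne, ih, hidx]
      | some i =>
        rw [PySem.List.index?_eq_idxOf?] at hidx
        simp [goA, hne, ih, hidx]

theorem layers_to_squash_py_spec : Claim_equal_layers_to_squash_py := by
  intro layers fl _
  unfold Spec_layers_to_squash_py layers_to_squash_py layers_to_squash_py_alt
  rw [foldA_eq_goA, goA_true]
  by_cases hm : fl ∈ layers
  · have hmr : fl ∈ layers.reverse := by simpa using hm
    obtain ⟨i, hidx⟩ : ∃ i, PySem.List.index? layers.reverse fl = some i := by
      rcases Option.isSome_iff_exists.mp ((PySem.List.index?_isSome_iff _ _).mpr hmr) with ⟨i, hi⟩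
      exact ⟨i, hi⟩
    obtain ⟨hil, -, -⟩ := PySem.List.getElem_of_index?_eq_some hidx
    have hn : layers.reverse.length = layers.length := by simp
    rw [hn] at hil
    simp only [hm, if_pos, hidx]
    have hlen : layers.length - 1 - i + 1 = layers.length - i := by omega
    rw [PySem.List.slice_from_natCast, PySem.List.slice_to_natCast, hlen]
    simp [List.take_reverse, List.drop_reverse]
  · have hnr : List.idxOf? fl layers.reverse = none := by
      rw [← PySem.List.index?_eq_idxOf?, PySem.List.index?_eq_none_iff]; simpa using hm
    simp [hm, hnr]
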